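-- pv_equiv track=rewrite | github.com/shadowplay1/ege_tasks | tasks/24/14100(alternative).py | max_subsequence_length
-- ===== SOURCE A (Python) =====
-- def max_subsequence_length(s):
--     substrings = ["ABA", "CB", "AC", "BB", "ABC", "BCB", "BA", "AB"]
--     n = len(s)
--     dp = [0] * (n + 1)
--
--     for i in range(1, n + 1):
--         for sub in substrings:
--             sub_len = len(sub)
--             if i >= sub_len and s[i-sub_len:i] == sub:
--                 dp[i] = max(dp[i], dp[i-sub_len] + sub_len)
--
--     return max(dp)
-- ===== SOURCE B (Python) =====
-- def max_subsequence_length(s):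
--     substrings = ["ABA", "CB", "AC", "BB", "ABC", "BCB", "BA", "AB"]
--     n = len(s)
--     memo = {}
--
--     def f(i):
--         # longest total length of a chain of allowed blocks starting exactly at i
--         if i in memo:
--             return memo[i]
--         best = 0
--         for sub in substrings:
--             if s.startswith(sub, i):
--                 best = max(best, len(sub) + f(i + len(sub)))
--         memo[i] = best
--         return best
--
--     # iterate starts from the right so each recursive call hits the memo (depth O(1))
--     return max(f(i) for i in range(n, -1, -1))
-- ===== Notes on version B (the rewrite author's own statement) =====
-- stated objective: alternative
-- what changed: Replaced the backward tabulation dp[i] over block ends (slice comparison s[i-L:i]) by a top-down memoized recursion f(i) = max(L + f(i+L)) over block starts matched with startswith, answering max(f(i)) over all start positions.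
import Mathlib
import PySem

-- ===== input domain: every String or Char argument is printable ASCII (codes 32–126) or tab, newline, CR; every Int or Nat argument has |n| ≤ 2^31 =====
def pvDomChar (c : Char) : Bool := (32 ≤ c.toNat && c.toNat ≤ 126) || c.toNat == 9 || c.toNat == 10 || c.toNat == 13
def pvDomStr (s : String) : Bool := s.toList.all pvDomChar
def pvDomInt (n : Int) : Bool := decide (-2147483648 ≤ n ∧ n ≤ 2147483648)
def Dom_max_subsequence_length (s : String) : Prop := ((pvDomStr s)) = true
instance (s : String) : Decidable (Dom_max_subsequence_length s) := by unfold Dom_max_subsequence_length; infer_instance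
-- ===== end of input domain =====

-- B replaces A's backward end-position table (slice compares s[i-L:i]) by a memoized
-- top-down recursion over start positions (startswith at i), taking the max over all starts;
-- objective: alternative decomposition, same asymptotic cost.

-- ===== PORT A =====
-- the 8 allowed substrings, shared literal of both programs
def pvSubs : List (List Char) :=
  [['A','B','A'], ['C','B'], ['A','C'], ['B','B'], ['A','B','C'], ['B','C','B'], ['B','A'], ['A','B']]

-- A's inner loop: `for sub in substrings: if i >= len(sub) and s[i-len(sub):i] == sub: dp[i] = max(...)`
def pvInnerA (cs : List Char) (dp : List Int) (i : Int) : List Int :=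
  pvSubs.foldl (fun dp sub =>
    if ((sub.length : Int) ≤ i ∧ PySem.List.slice cs (some (i - (sub.length : Int))) (some i) = sub) then
      PySem.List.pySetD dp i
        (max (PySem.List.pyGetD dp i 0) (PySem.List.pyGetD dp (i - (sub.length : Int)) 0 + (sub.length : Int)))
    else dp) dp

def max_subsequence_length (s : String) : Int :=
  let cs := s.toList
  let n : Int := (cs.length : Int)
  let dp := (PySem.List.pyRange 1 (n + 1) 1).foldl (pvInnerA cs) (List.replicate (cs.length + 1) 0)
  -- max(dp); dp is nonempty (length n+1), so the .getD 0 default is never used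
  (PySem.List.max? dp (fun x => x)).getD 0

-- ===== PORT B =====
-- s.startswith(sub, i) for 0 ≤ i (exact: drop clamps past the end exactly as Python's start offset does)
def pvStarts (cs : List Char) (i : Nat) (sub : List Char) : Bool :=
  PySem.Chars.startswith (cs.drop i) sub

-- termination fact the recursion below cites: a nonempty match at i ends by i+L ≤ |cs|
theorem pvStarts_bound {cs : List Char} {i : Nat} {sub : List Char}
    (h : pvStarts cs i sub = true) (hne : sub ≠ []) :
    1 ≤ sub.length ∧ i + sub.length ≤ cs.length := by
  have hp : sub <+: cs.drop i := (PySem.Chars.startswith_iff _ _).mp h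
  have hl : sub.length ≤ (cs.drop i).length := hp.length_le
  rw [List.length_drop] at hl
  have h1 : 1 ≤ sub.length := by
    cases sub with
    | nil => exact absurd rfl hne
    | cons a t => simp
  exact ⟨h1, by omega⟩

mutual
-- f(i): best total chain length starting at i (the memo only caches this pure value)
def pvF (cs : List Char) (i : Nat) : Int :=
  pvFgo cs i pvSubs (by decide) 0
termination_by (cs.length + 1 - i, pvSubs.length + 1)

-- `best = 0; for sub in substrings: if s.startswith(sub, i): best = max(best, len(sub) + f(i+len(sub)))`
def pvFgo (cs : List Char) (i : Nat) (subs : List (List Char))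
    (hne : ∀ u ∈ subs, u ≠ []) (best : Int) : Int :=
  match subs with
  | [] => best
  | sub :: rest =>
    if h : pvStarts cs i sub = true then
      pvFgo cs i rest (fun u hu => hne u (List.mem_cons_of_mem _ hu))
        (max best ((sub.length : Int) + pvF cs (i + sub.length)))
    else
      pvFgo cs i rest (fun u hu => hne u (List.mem_cons_of_mem _ hu)) best
termination_by (cs.length + 1 - i, subs.length)
decreasing_by
  all_goals simp_wf
  all_goals first
    | (apply Prod.Lex.right; omega)
    | (obtain ⟨h1, h2⟩ := pvStarts_bound h (hne sub (List.mem_cons_self)); apply Prod.Lex.left; omega)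
end

def max_subsequence_length_alt (s : String) : Int :=
  let cs := s.toList
  let n : Int := (cs.length : Int)
  -- max(f(i) for i in range(n, -1, -1)); i ≥ 0 on this range, so .toNat is exact
  (PySem.List.max? ((PySem.List.pyRange n (-1) (-1)).map (fun i => pvF cs i.toNat)) (fun x => x)).getD 0

-- ===== PRECONDITION & SPEC =====
def Spec_max_subsequence_length (s : String) (out : Int) : Prop := out = max_subsequence_length_alt s
instance (s : String) (out : Int) : Decidable (Spec_max_subsequence_length s out) := by unfold Spec_max_subsequence_length; infer_instance

-- ===== CLAIM (what is proved, stated in full; the proofs are below) =====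
def Claim_equal_max_subsequence_length : Prop := ∀ (s : String), Dom_max_subsequence_length s → Spec_max_subsequence_length s (max_subsequence_length s)

-- ===== LEMMAS AND PROOFS =====

-- `sub` matches cs at position i (full match, so i + |sub| ≤ |cs| when sub ≠ [])
abbrev pvMatch (cs : List Char) (i : Nat) (sub : List Char) : Prop :=
  (cs.drop i).take sub.length = sub

theorem pvMatch_iff_starts {cs : List Char} {i : Nat} {sub : List Char} :
    pvMatch cs i sub ↔ pvStarts cs i sub = true := by
  unfold pvMatch pvStarts
  rw [PySem.Chars.startswith_iff]
  exact ⟨fun h => List.prefix_iff_eq_take.mpr h.symm, fun h => (List.prefix_iff_eq_take.mp h).symm⟩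

theorem pvMatch_bound {cs : List Char} {i : Nat} {sub : List Char}
    (hm : pvMatch cs i sub) (hne : sub ≠ []) :
    1 ≤ sub.length ∧ i + sub.length ≤ cs.length :=
  pvStarts_bound (pvMatch_iff_starts.mp hm) hne

theorem pvSubs_ne : ∀ u ∈ pvSubs, u ≠ [] := by decide

-- proof-side mirror of A's dp recurrence: value of dp[j] once the outer loop has passed j
mutual
def pvG (cs : List Char) (j : Nat) : Int :=
  pvGgo cs j pvSubs (by decide) 0
termination_by (j, pvSubs.length + 1)

def pvGgo (cs : List Char) (j : Nat) (subs : List (List Char))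
    (hne : ∀ u ∈ subs, u ≠ []) (best : Int) : Int :=
  match subs with
  | [] => best
  | sub :: rest =>
    if h : (sub.length ≤ j ∧ pvMatch cs (j - sub.length) sub) then
      pvGgo cs j rest (fun u hu => hne u (List.mem_cons_of_mem _ hu))
        (max best (pvG cs (j - sub.length) + (sub.length : Int)))
    else
      pvGgo cs j rest (fun u hu => hne u (List.mem_cons_of_mem _ hu)) best
termination_by (j, subs.length)
decreasing_by
  all_goals simp_wf
  all_goals first
    | (apply Prod.Lex.right; omega)
    | (have h1 := List.length_pos_of_ne_nil (hne sub (List.mem_cons_self));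
       apply Prod.Lex.left; omega)
end

-- a chain of allowed blocks tiling [i, j)
inductive pvTile (cs : List Char) : Nat → Nat → Prop
| refl (i : Nat) : pvTile cs i i
| step {i j : Nat} (sub : List Char) (hmem : sub ∈ pvSubs) (hm : pvMatch cs i sub)
    (ht : pvTile cs (i + sub.length) j) : pvTile cs i j

theorem pvTile_le {cs : List Char} {i j : Nat} (h : pvTile cs i j) : i ≤ j := by
  induction h with
  | refl => omega
  | step sub hmem hm ht ih => omega

theorem pvTile_trans {cs : List Char} {i k j : Nat} (h1 : pvTile cs i k) (h2 : pvTile cs k j) :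
    pvTile cs i j := by
  induction h1 with
  | refl => exact h2
  | step sub hmem hm ht ih => exact pvTile.step sub hmem hm (ih h2)

theorem pvTile_end_le {cs : List Char} {i j : Nat} (h : pvTile cs i j) (hne : i ≠ j) :
    j ≤ cs.length := by
  induction h with
  | refl => omega
  | @step i j sub hmem hm ht ih =>
    have hb := pvMatch_bound hm (pvSubs_ne sub hmem)
    by_cases hc : i + sub.length = j
    · omega
    · exact ih hc

theorem pvTile_peel {cs : List Char} {i j : Nat} (h : pvTile cs i j) (hne : i ≠ j) :
    ∃ sub ∈ pvSubs, ∃ k, k + sub.length = j ∧ pvMatch cs k sub ∧ pvTile cs i k := by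
  induction h with
  | refl => omega
  | @step i j sub hmem hm ht ih =>
    by_cases hc : i + sub.length = j
    · exact ⟨sub, hmem, i, hc, hm, pvTile.refl i⟩
    · obtain ⟨sub', hmem', k, hk, hm', ht'⟩ := ih hc
      exact ⟨sub', hmem', k, hk, hm', pvTile.step sub hmem hm ht'⟩

-- ---- fold-shape facts about pvFgo ----
theorem pvFgo_ge_best (cs : List Char) (i : Nat) (subs : List (List Char))
    (hne : ∀ u ∈ subs, u ≠ []) (best : Int) : best ≤ pvFgo cs i subs hne best := by
  induction subs generalizing best with
  | nil => simp [pvFgo]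
  | cons sub rest ih =>
    rw [pvFgo]
    split
    · exact le_trans (le_max_left _ _) (ih _ _)
    · exact ih _ _

theorem pvF_nonneg (cs : List Char) (i : Nat) : 0 ≤ pvF cs i := by
  rw [pvF]; exact pvFgo_ge_best cs i pvSubs (by decide) 0

theorem pvFgo_ge_cand (cs : List Char) (i : Nat) (subs : List (List Char))
    (hne : ∀ u ∈ subs, u ≠ []) (best : Int) (sub : List Char) (hmem : sub ∈ subs)
    (hs : pvStarts cs i sub = true) :
    (sub.length : Int) + pvF cs (i + sub.length) ≤ pvFgo cs i subs hne best := by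
  induction subs generalizing best with
  | nil => simp at hmem
  | cons u rest ih =>
    rw [pvFgo]
    rcases List.mem_cons.mp hmem with heq | hmem'
    · subst heq
      rw [dif_pos hs]
      exact le_trans (le_max_right _ _) (pvFgo_ge_best _ _ _ _ _)
    · split
      · exact ih _ _ hmem'
      · exact ih _ _ hmem'

theorem pvFgo_cases (cs : List Char) (i : Nat) (subs : List (List Char))
    (hne : ∀ u ∈ subs, u ≠ []) (best : Int) :
    pvFgo cs i subs hne best = best ∨
      ∃ sub ∈ subs, pvStarts cs i sub = true ∧
        pvFgo cs i subs hne best = (sub.length : Int) + pvF cs (i + sub.length) := by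
  induction subs generalizing best with
  | nil => left; simp [pvFgo]
  | cons sub rest ih =>
    rw [pvFgo]
    split
    · rcases ih (fun u hu => hne u (List.mem_cons_of_mem _ hu))
        (max best ((sub.length : Int) + pvF cs (i + sub.length))) with h | ⟨u, hu, hs, he⟩
      · rcases max_cases best ((sub.length : Int) + pvF cs (i + sub.length)) with ⟨hm, _⟩ | ⟨hm, _⟩
        · left; rw [h, hm]
        · right; exact ⟨sub, List.mem_cons_self, by assumption, by rw [h, hm]⟩
      · right; exact ⟨u, List.mem_cons_of_mem _ hu, hs, he⟩
    · rcases ih (fun u hu => hne u (List.mem_cons_of_mem _ hu)) best with h | ⟨u, hu, hs, he⟩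
      · left; exact h
      · right; exact ⟨u, List.mem_cons_of_mem _ hu, hs, he⟩

-- ---- fold-shape facts about pvGgo ----
theorem pvGgo_ge_best (cs : List Char) (j : Nat) (subs : List (List Char))
    (hne : ∀ u ∈ subs, u ≠ []) (best : Int) : best ≤ pvGgo cs j subs hne best := by
  induction subs generalizing best with
  | nil => simp [pvGgo]
  | cons sub rest ih =>
    rw [pvGgo]
    split
    · exact le_trans (le_max_left _ _) (ih _ _)
    · exact ih _ _

theorem pvG_nonneg (cs : List Char) (j : Nat) : 0 ≤ pvG cs j := by
  rw [pvG]; exact pvGgo_ge_best cs j pvSubs (by decide) 0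

theorem pvGgo_ge_cand (cs : List Char) (j : Nat) (subs : List (List Char))
    (hne : ∀ u ∈ subs, u ≠ []) (best : Int) (sub : List Char) (hmem : sub ∈ subs)
    (hg : sub.length ≤ j ∧ pvMatch cs (j - sub.length) sub) :
    pvG cs (j - sub.length) + (sub.length : Int) ≤ pvGgo cs j subs hne best := by
  induction subs generalizing best with
  | nil => simp at hmem
  | cons u rest ih =>
    rw [pvGgo]
    rcases List.mem_cons.mp hmem with heq | hmem'
    · subst heq
      rw [dif_pos hg]
      exact le_trans (le_max_right _ _) (pvGgo_ge_best _ _ _ _ _)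
    · split
      · exact ih _ _ hmem'
      · exact ih _ _ hmem'

theorem pvGgo_cases (cs : List Char) (j : Nat) (subs : List (List Char))
    (hne : ∀ u ∈ subs, u ≠ []) (best : Int) :
    pvGgo cs j subs hne best = best ∨
      ∃ sub ∈ subs, (sub.length ≤ j ∧ pvMatch cs (j - sub.length) sub) ∧
        pvGgo cs j subs hne best = pvG cs (j - sub.length) + (sub.length : Int) := by
  induction subs generalizing best with
  | nil => left; simp [pvGgo]
  | cons sub rest ih =>
    rw [pvGgo]
    split
    · rcases ih (fun u hu => hne u (List.mem_cons_of_mem _ hu))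
        (max best (pvG cs (j - sub.length) + (sub.length : Int))) with h | ⟨u, hu, hs, he⟩
      · rcases max_cases best (pvG cs (j - sub.length) + (sub.length : Int)) with ⟨hm, _⟩ | ⟨hm, _⟩
        · left; rw [h, hm]
        · right; exact ⟨sub, List.mem_cons_self, by assumption, by rw [h, hm]⟩
      · right; exact ⟨u, List.mem_cons_of_mem _ hu, hs, he⟩
    · rcases ih (fun u hu => hne u (List.mem_cons_of_mem _ hu)) best with h | ⟨u, hu, hs, he⟩
      · left; exact h
      · right; exact ⟨u, List.mem_cons_of_mem _ hu, hs, he⟩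

-- ---- pvF / pvG against pvTile ----
theorem pvTile_le_pvF {cs : List Char} {i j : Nat} (h : pvTile cs i j) :
    (j : Int) - (i : Int) ≤ pvF cs i := by
  induction h with
  | refl i => simpa using pvF_nonneg cs i
  | @step i j sub hmem hm ht ih =>
    have hij : i + sub.length ≤ j := pvTile_le ht
    have hc : (sub.length : Int) + pvF cs (i + sub.length) ≤ pvF cs i := by
      conv_rhs => rw [pvF]
      exact pvFgo_ge_cand cs i pvSubs (by decide) 0 sub hmem (pvMatch_iff_starts.mp hm)
    have : (j : Int) - i = (sub.length : Int) + ((j : Int) - ((i : Nat) + sub.length : Nat)) := by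
      push_cast; ring
    omega

theorem pvF_wit (cs : List Char) : ∀ fuel i, cs.length + 1 - i ≤ fuel →
    ∃ j, pvTile cs i j ∧ pvF cs i = (j : Int) - (i : Int) := by
  intro fuel
  induction fuel with
  | zero =>
    intro i hf
    -- i ≥ cs.length + 1: no sub matches (full match would need i + |sub| ≤ |cs|)
    have h0 : pvF cs i = 0 := by
      rw [pvF]
      rcases pvFgo_cases cs i pvSubs (by decide) 0 with h | ⟨sub, hmem, hs, _⟩
      · exact h
      · have := pvStarts_bound hs (pvSubs_ne sub hmem)
        omega
    exact ⟨i, pvTile.refl i, by omega⟩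
  | succ fuel ih =>
    intro i hf
    rw [pvF]
    rcases pvFgo_cases cs i pvSubs (by decide) 0 with h | ⟨sub, hmem, hs, he⟩
    · exact ⟨i, pvTile.refl i, by omega⟩
    · have hb := pvStarts_bound hs (pvSubs_ne sub hmem)
      obtain ⟨j, ht, hv⟩ := ih (i + sub.length) (by omega)
      refine ⟨j, pvTile.step sub hmem (pvMatch_iff_starts.mpr hs) ht, ?_⟩
      have hij := pvTile_le ht
      rw [he, hv]
      push_cast
      omega

theorem pvTile_le_pvG {cs : List Char} : ∀ j, ∀ i, pvTile cs i j → (j : Int) - (i : Int) ≤ pvG cs j := by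
  intro j
  induction j using Nat.strong_induction_on with
  | _ j ihj =>
    intro i h
    by_cases hij : i = j
    · subst hij; simpa using pvG_nonneg cs _
    · obtain ⟨sub, hmem, k, hk, hm, ht⟩ := pvTile_peel h hij
      have h1 : 1 ≤ sub.length := by
        have := pvSubs_ne sub hmem
        cases sub with
        | nil => exact absurd rfl this
        | cons a t => simp
      have hik := pvTile_le ht
      have hkj : k < j := by omega
      have ihk := ihj k hkj i ht
      have hc : pvG cs (j - sub.length) + (sub.length : Int) ≤ pvG cs j := by
        conv_rhs => rw [pvG]
        exact pvGgo_ge_cand cs j pvSubs (by decide) 0 sub hmem ⟨by omega, by rwa [show j - sub.length = k by omega]⟩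
      have hjk : j - sub.length = k := by omega
      rw [hjk] at hc
      omega

theorem pvG_wit (cs : List Char) : ∀ j, ∃ i, pvTile cs i j ∧ pvG cs j = (j : Int) - (i : Int) := by
  intro j
  induction j using Nat.strong_induction_on with
  | _ j ihj =>
    rw [pvG]
    rcases pvGgo_cases cs j pvSubs (by decide) 0 with h | ⟨sub, hmem, ⟨hlj, hm⟩, he⟩
    · exact ⟨j, pvTile.refl j, by omega⟩
    · have h1 : 1 ≤ sub.length := by
        have := pvSubs_ne sub hmem
        cases sub with
        | nil => exact absurd rfl this
        | cons a t => simp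
      obtain ⟨i, ht, hv⟩ := ihj (j - sub.length) (by omega)
      have hstep : pvTile cs (j - sub.length) j :=
        pvTile.step sub hmem hm (by rw [show j - sub.length + sub.length = j by omega]; exact pvTile.refl j)
      refine ⟨i, pvTile_trans ht hstep, ?_⟩
      have hii := pvTile_le ht
      rw [he, hv]
      omega

-- pvG at 0 is 0 (every allowed block has length ≥ 2 > 0)
theorem pvG_zero (cs : List Char) : pvG cs 0 = 0 := by
  rw [pvG]
  rcases pvGgo_cases cs 0 pvSubs (by decide) 0 with h | ⟨sub, hmem, ⟨hlj, _⟩, _⟩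
  · exact h
  · have h1 : 1 ≤ sub.length := by
      have := pvSubs_ne sub hmem
      cases sub with
      | nil => exact absurd rfl this
      | cons a t => simp
    omega

-- ---- A's fold produces pvG ----
theorem pv_getD_set_self (l : List Int) (i : Nat) (v : Int) (h : i < l.length) :
    (l.set i v).getD i 0 = v := by
  simp [List.getD_eq_getElem?_getD, List.getElem?_set_self', List.getElem?_eq_getElem h]

theorem pv_getD_set_ne (l : List Int) (i j : Nat) (v : Int) (h : j ≠ i) :
    (l.set i v).getD j 0 = l.getD j 0 := by
  simp [List.getD_eq_getElem?_getD, List.getElem?_set_ne (by omega : i ≠ j)]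

theorem pv_getD_mem (l : List Int) (j : Nat) (h : j < l.length) : l.getD j 0 ∈ l := by
  rw [List.getD_eq_getElem l 0 h]; exact List.getElem_mem h

-- A's guard at position iN is exactly pvG's guard
theorem pvGuard_iff (cs : List Char) (iN : Nat) (sub : List Char) :
    ((sub.length : Int) ≤ (iN : Int) ∧
      PySem.List.slice cs (some ((iN : Int) - (sub.length : Int))) (some (iN : Int)) = sub) ↔
    (sub.length ≤ iN ∧ pvMatch cs (iN - sub.length) sub) := by
  by_cases hL : sub.length ≤ iN
  · have hcast : (iN : Int) - (sub.length : Int) = ((iN - sub.length : Nat) : Int) := by omega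
    rw [hcast, PySem.List.slice_natCast]
    have : iN - (iN - sub.length) = sub.length := by omega
    rw [this]
    unfold pvMatch
    constructor
    · rintro ⟨-, h2⟩; exact ⟨hL, h2⟩
    · rintro ⟨-, h2⟩; exact ⟨by omega, h2⟩
  · constructor
    · rintro ⟨h1, -⟩; omega
    · rintro ⟨h1, -⟩; omega

theorem pvInnerA_go (cs : List Char) (iN : Nat) (hin : iN ≤ cs.length) :
    ∀ (subs : List (List Char)) (hne : ∀ u ∈ subs, u ≠ []) (dp : List Int),
    dp.length = cs.length + 1 →
    (∀ m : Nat, m < iN → dp.getD m 0 = pvG cs m) →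
    ∃ dp' : List Int,
      (subs.foldl (fun dp sub =>
        if ((sub.length : Int) ≤ (iN : Int) ∧ PySem.List.slice cs (some ((iN : Int) - (sub.length : Int))) (some (iN : Int)) = sub) then
          PySem.List.pySetD dp (iN : Int)
            (max (PySem.List.pyGetD dp (iN : Int) 0) (PySem.List.pyGetD dp ((iN : Int) - (sub.length : Int)) 0 + (sub.length : Int)))
        else dp) dp) = dp' ∧
      dp'.length = cs.length + 1 ∧
      (∀ j : Nat, j ≠ iN → dp'.getD j 0 = dp.getD j 0) ∧
      dp'.getD iN 0 = pvGgo cs iN subs hne (dp.getD iN 0) := by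
  intro subs
  induction subs with
  | nil =>
    intro hne dp hlen hpast
    exact ⟨dp, rfl, hlen, fun j _ => rfl, by simp [pvGgo]⟩
  | cons sub rest ih =>
    intro hne dp hlen hpast
    rw [List.foldl_cons, pvGgo]
    by_cases hg : (sub.length ≤ iN ∧ pvMatch cs (iN - sub.length) sub)
    · have hgA := (pvGuard_iff cs iN sub).mpr hg
      rw [if_pos hgA, dif_pos hg]
      have h1 : 1 ≤ sub.length := List.length_pos_of_ne_nil (hne sub List.mem_cons_self)
      have hcast : (iN : Int) - (sub.length : Int) = ((iN - sub.length : Nat) : Int) := by omega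
      have hset : PySem.List.pySetD dp (iN : Int)
            (max (PySem.List.pyGetD dp (iN : Int) 0) (PySem.List.pyGetD dp ((iN : Int) - (sub.length : Int)) 0 + (sub.length : Int)))
          = dp.set iN (max (dp.getD iN 0) (pvG cs (iN - sub.length) + (sub.length : Int))) := by
        rw [hcast]
        simp only [PySem.List.pySetD_natCast, PySem.List.pyGetD_natCast]
        rw [hpast (iN - sub.length) (by omega)]
      rw [hset]
      obtain ⟨dp', heq, hlen', hother, hiN⟩ := ih (fun u hu => hne u (List.mem_cons_of_mem _ hu))
        (dp.set iN (max (dp.getD iN 0) (pvG cs (iN - sub.length) + (sub.length : Int))))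
        (by rw [List.length_set]; exact hlen)
        (fun m hm => by
          rw [pv_getD_set_ne _ _ _ _ (by omega)]; exact hpast m hm)
      refine ⟨dp', heq, hlen', ?_, ?_⟩
      · intro j hj
        rw [hother j hj, pv_getD_set_ne _ _ _ _ hj]
      · rw [hiN, pv_getD_set_self _ _ _ (by omega)]
    · have hgA := (pvGuard_iff cs iN sub).not.mpr hg
      rw [if_neg hgA, dif_neg hg]
      exact ih (fun u hu => hne u (List.mem_cons_of_mem _ hu)) dp hlen hpast

theorem pvOuter (cs : List Char) : ∀ m, m ≤ cs.length →
    ∃ dp : List Int,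
      ((PySem.List.pyRange 1 ((m : Int) + 1) 1).foldl (pvInnerA cs) (List.replicate (cs.length + 1) 0)) = dp ∧
      dp.length = cs.length + 1 ∧
      (∀ j : Nat, dp.getD j 0 = if j ≤ m then pvG cs j else 0) := by
  intro m
  induction m with
  | zero =>
    intro _
    refine ⟨List.replicate (cs.length + 1) 0, ?_, by simp, ?_⟩
    · rw [PySem.List.pyRange_one_eq_nil (by norm_num), List.foldl_nil]
    · intro j
      have hz : (List.replicate (cs.length + 1) (0:Int)).getD j 0 = 0 := by
        rcases lt_or_ge j (cs.length + 1) with h | h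
        · simp [List.getD_eq_getElem?_getD, h]
        · simp [List.getD_eq_getElem?_getD,
            List.getElem?_eq_none (l := List.replicate (cs.length + 1) (0:Int)) (by simpa using h)]
      rw [hz]
      split
      · next h => rw [show j = 0 by omega, pvG_zero]
      · rfl
  | succ m ih =>
    intro hm
    obtain ⟨dpm, heq, hlen, hval⟩ := ih (by omega)
    have hsplit : PySem.List.pyRange 1 (((m + 1 : Nat) : Int) + 1) 1
        = PySem.List.pyRange 1 ((m : Int) + 1) 1 ++ [(m : Int) + 1] := by
      have : ((m + 1 : Nat) : Int) + 1 = ((m : Int) + 1) + 1 := by push_cast; ring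
      rw [this, PySem.List.pyRange_one_succ_right (by omega)]
    rw [hsplit, List.foldl_append, heq, List.foldl_cons, List.foldl_nil]
    have hcast : (m : Int) + 1 = ((m + 1 : Nat) : Int) := by push_cast; ring
    rw [hcast]
    obtain ⟨dp', heq', hlen', hother, hiN⟩ := pvInnerA_go cs (m + 1) (by omega) pvSubs pvSubs_ne dpm hlen
      (fun k hk => by rw [hval k, if_pos (by omega)])
    refine ⟨dp', ?_, hlen', ?_⟩
    · rw [pvInnerA]; exact heq'
    · intro j
      by_cases hj : j = m + 1
      · subst hj
        rw [hiN, hval (m+1), if_neg (by omega), if_pos (le_refl _)]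
        rw [pvG]
      · rw [hother j hj, hval j]
        by_cases hjm : j ≤ m
        · rw [if_pos hjm, if_pos (by omega)]
        · rw [if_neg hjm, if_neg (by omega)]

-- ===== VERDICT (by name: the statement is the Claim_ definition above) =====
theorem max_subsequence_length_spec : Claim_equal_max_subsequence_length := by
  intro s _
  unfold Spec_max_subsequence_length
  simp only [max_subsequence_length, max_subsequence_length_alt]
  obtain ⟨dp, heq, hlen, hval⟩ := pvOuter s.toList s.toList.length (le_refl _)
  rw [heq]
  -- the A-side maximum
  rcases hA : PySem.List.max? dp (fun x => x) with _ | MA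
  · exact absurd ((PySem.List.max?_eq_none_iff _ _).mp hA)
      (List.ne_nil_of_length_pos (by omega))
  have hmemA : MA ∈ dp := PySem.List.max?_mem hA
  have hmaxA : ∀ y ∈ dp, y ≤ MA := PySem.List.max?_isMax hA
  obtain ⟨jA, hjA, hgetA⟩ := List.mem_iff_getElem.mp hmemA
  have hMA : MA = pvG s.toList jA := by
    have : dp.getD jA 0 = MA := by rw [List.getD_eq_getElem dp 0 hjA]; exact hgetA
    rw [← this, hval jA, if_pos (by omega)]
  have gle : ∀ j : Nat, j ≤ s.toList.length → pvG s.toList j ≤ MA := by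
    intro j hj
    have hmem := pv_getD_mem dp j (by omega)
    rw [hval j, if_pos hj] at hmem
    exact hmaxA _ hmem
  -- the B-side maximum
  rcases hB : PySem.List.max? ((PySem.List.pyRange (s.toList.length : Int) (-1) (-1)).map
      (fun i => pvF s.toList i.toNat)) (fun x => x) with _ | MB
  · have hm : ((s.toList.length : Int)) ∈ PySem.List.pyRange (s.toList.length : Int) (-1) (-1) := by
      rw [PySem.List.mem_pyRange_neg_one]
      constructor <;> omega
    exact absurd ((PySem.List.max?_eq_none_iff _ _).mp hB)
      (List.ne_nil_of_mem (List.mem_map_of_mem (f := fun i => pvF s.toList i.toNat) hm))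
  have hmemB := PySem.List.max?_mem hB
  have hmaxB' := PySem.List.max?_isMax hB
  obtain ⟨iB', hiB', hfB⟩ := List.mem_map.mp hmemB
  rw [PySem.List.mem_pyRange_neg_one] at hiB'
  have hiBle : iB'.toNat ≤ s.toList.length := by omega
  have hMB : MB = pvF s.toList iB'.toNat := hfB.symm
  have fle : ∀ i : Nat, i ≤ s.toList.length → pvF s.toList i ≤ MB := by
    intro i hi
    have hm : ((i : Int)) ∈ PySem.List.pyRange (s.toList.length : Int) (-1) (-1) := by
      rw [PySem.List.mem_pyRange_neg_one]
      constructor <;> omega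
    have := hmaxB' _ (List.mem_map_of_mem (f := fun k => pvF s.toList k.toNat) hm)
    simpa [Int.toNat_natCast] using this
  -- MA ≤ MB
  have le1 : MA ≤ MB := by
    obtain ⟨i0, ht, hv⟩ := pvG_wit s.toList jA
    have h1 := pvTile_le_pvF ht
    have h2 := pvTile_le ht
    have h3 := fle i0 (by omega)
    omega
  -- MB ≤ MA
  have le2 : MB ≤ MA := by
    obtain ⟨j, ht, hv⟩ := pvF_wit s.toList (s.toList.length + 1) iB'.toNat (by omega)
    have h2 := pvTile_le ht
    have hj : j ≤ s.toList.length := by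
      by_cases hc : iB'.toNat = j
      · omega
      · exact pvTile_end_le ht hc
    have h1 := pvTile_le_pvG j iB'.toNat ht
    have h3 := gle j hj
    omega
  rw [hB]
  simp only [Option.getD_some]
  omega
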